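-- pv_equiv track=rewrite | github.com/richfitz/advent-of-code | 2023/d13.py | can_reflect
-- ===== SOURCE A (Python) =====
-- def can_reflect(at, i, m, dim, n_smudge):
--     n = min(at + 1, dim[i] - at - 1)
--     seen = set()
--     for p in m:
--         a = at - p[i] if p[i] <= at else p[i] - at - 1
--         if a < n:
--             x = (a, p[1 - i])
--             seen.remove(x) if x in seen else seen.add(x)
--     return len(seen) == n_smudge
-- ===== SOURCE B (Python) =====
-- def can_reflect(at, i, m, dim, n_smudge):
--     # Count points in the reflection band whose mirror image is missing from m,
--     # instead of maintaining a toggled set.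
--     n = min(at + 1, dim[i] - at - 1)
--     pts = set(m)
--     bad = 0
--     for p in m:
--         d = at - p[i] if p[i] <= at else p[i] - at - 1
--         if d < n:
--             q = list(p)
--             q[i] = 2 * at + 1 - p[i]
--             if tuple(q) not in pts:
--                 bad += 1
--     return bad == n_smudge
-- ===== Notes on version B (the rewrite author's own statement) =====
-- stated objective: alternative
-- what changed: Instead of A's XOR-toggling set of mirror keys, B counts the in-band points whose reflected partner point (coordinate 2*at+1-p[i]) is missing from the point set, using membership tests only; the toggled set's size equals that count because distinct points pair up one-to-one across the mirror.
import Mathlib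
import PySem

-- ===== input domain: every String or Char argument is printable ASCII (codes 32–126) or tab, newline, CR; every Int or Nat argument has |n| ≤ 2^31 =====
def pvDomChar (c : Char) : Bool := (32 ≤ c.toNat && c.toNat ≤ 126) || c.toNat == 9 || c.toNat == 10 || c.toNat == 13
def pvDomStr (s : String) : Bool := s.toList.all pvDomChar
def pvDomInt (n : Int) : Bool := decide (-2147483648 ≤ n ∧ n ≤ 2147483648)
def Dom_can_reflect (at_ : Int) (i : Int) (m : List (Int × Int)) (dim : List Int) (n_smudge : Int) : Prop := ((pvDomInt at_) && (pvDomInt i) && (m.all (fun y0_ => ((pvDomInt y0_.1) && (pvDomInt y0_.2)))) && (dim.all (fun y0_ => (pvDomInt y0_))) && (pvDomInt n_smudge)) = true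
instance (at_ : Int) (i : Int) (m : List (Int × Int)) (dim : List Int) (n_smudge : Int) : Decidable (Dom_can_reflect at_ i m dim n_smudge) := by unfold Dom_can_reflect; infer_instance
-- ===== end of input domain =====

-- B counts in-band points whose mirror-image point is absent from m (pure membership tests) instead of A's XOR-toggling set; equivalence of the RETURN value is proved on Pre_.

-- ===== PORT A =====
-- Python tuple indexing p[j] for a pair: valid indices 0, 1, -1, -2; none = IndexError.
def tupGet? (p : Int × Int) (j : Int) : Option Int :=
  if j = 0 ∨ j = -2 then some p.1 else if j = 1 ∨ j = -1 then some p.2 else none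

def can_reflect (at_ : Int) (i : Int) (m : List (Int × Int)) (dim : List Int) (n_smudge : Int) : Bool :=
  match PySem.List.pyGet? dim i with
  | none => false
  | some di =>
    let n := min (at_ + 1) (di - at_ - 1)
    let seen : PySem.Set (Int × Int) := m.foldl (fun s p =>
      match tupGet? p i with
      | none => s
      | some pi =>
        let a := if pi ≤ at_ then at_ - pi else pi - at_ - 1
        if a < n then
          match tupGet? p (1 - i) with
          | none => s
          | some po =>
            if PySem.Set.contains s (a, po) then (PySem.Set.remove? s (a, po)).getD s
            else PySem.Set.add s (a, po)
        else s) PySem.Set.empty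
    decide (PySem.Set.len seen = n_smudge)

-- ===== PORT B =====
-- Python `q = list(p); q[i] = v; tuple(q)` for a pair: valid indices 0, 1, -1, -2.
def tupSet (p : Int × Int) (j : Int) (v : Int) : Int × Int :=
  if j = 0 ∨ j = -2 then (v, p.2) else (p.1, v)

def can_reflect_alt (at_ : Int) (i : Int) (m : List (Int × Int)) (dim : List Int) (n_smudge : Int) : Bool :=
  match PySem.List.pyGet? dim i with
  | none => false
  | some di =>
    let n := min (at_ + 1) (di - at_ - 1)
    -- `tuple(q) not in pts` where pts = set(m): membership in a set equals membership in m.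
    let bad : Int := m.foldl (fun k p =>
      match tupGet? p i with
      | none => k
      | some pi =>
        let d := if pi ≤ at_ then at_ - pi else pi - at_ - 1
        if d < n then
          if tupSet p i (2 * at_ + 1 - pi) ∈ m then k else k + 1
        else k) 0
    decide (bad = n_smudge)

-- ===== PRECONDITION & SPEC =====
-- Pre_ excludes exactly the inputs where Python A raises IndexError (dim[i], p[i] or p[1 - i] out of
-- range); m.Nodup restates that m is a Python set of points (its List image holds distinct elements).
-- The middle disjunct keeps the wrap-around indices i = -1/-2 on which Python returns (no point ever
-- reaches the raising p[1-i] access, i.e. no point's mirror distance is below the band width n).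
def Pre_can_reflect (at_ : Int) (i : Int) (m : List (Int × Int)) (dim : List Int) (n_smudge : Int) : Prop :=
  ((i = 0 ∨ i = 1) ∧ i < (dim.length : Int) ∧ m.Nodup)
  ∨ ((i = -1 ∨ i = -2) ∧ i.natAbs ≤ dim.length ∧
      ∀ p ∈ m, ¬ ((if (if i = -1 then p.2 else p.1) ≤ at_
                    then at_ - (if i = -1 then p.2 else p.1)
                    else (if i = -1 then p.2 else p.1) - at_ - 1)
                  < min (at_ + 1) (PySem.List.pyGetD dim i 0 - at_ - 1)))
  ∨ (m = [] ∧ -(dim.length : Int) ≤ i ∧ i < (dim.length : Int))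
instance (at_ : Int) (i : Int) (m : List (Int × Int)) (dim : List Int) (n_smudge : Int) : Decidable (Pre_can_reflect at_ i m dim n_smudge) := by unfold Pre_can_reflect; infer_instance

def pvWitness_can_reflect : Int × Int × (List (Int × Int)) × List Int × Int := (1, 0, [(0, 0), (1, 1)], [3, 3], 0)

def Spec_can_reflect (at_ : Int) (i : Int) (m : List (Int × Int)) (dim : List Int) (n_smudge : Int) (out : Bool) : Prop := out = can_reflect_alt at_ i m dim n_smudge
instance (at_ : Int) (i : Int) (m : List (Int × Int)) (dim : List Int) (n_smudge : Int) (out : Bool) : Decidable (Spec_can_reflect at_ i m dim n_smudge out) := by unfold Spec_can_reflect; infer_instance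

-- ===== CLAIM (what is proved, stated in full; the proofs are below) =====
def Claim_equal_can_reflect : Prop := ∀ (at_ : Int) (i : Int) (m : List (Int × Int)) (dim : List Int) (n_smudge : Int), Dom_can_reflect at_ i m dim n_smudge → Pre_can_reflect at_ i m dim n_smudge → Spec_can_reflect at_ i m dim n_smudge (can_reflect at_ i m dim n_smudge)

-- ===== LEMMAS AND PROOFS =====

-- A's toggling step, and two auxiliary one-sided insertion steps used only to analyse it
-- (c selects the mirrored coordinate, r the other one, mk rebuilds a point).
def stepT (at_ n : Int) (c r : Int × Int → Int) (s : PySem.Set (Int × Int)) (p : Int × Int) : PySem.Set (Int × Int) :=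
  let a := if c p ≤ at_ then at_ - c p else c p - at_ - 1
  if a < n then
    if PySem.Set.contains s (a, r p) then (PySem.Set.remove? s (a, r p)).getD s
    else PySem.Set.add s (a, r p)
  else s

def stepL (at_ n : Int) (c r : Int × Int → Int) (s : PySem.Set (Int × Int)) (p : Int × Int) : PySem.Set (Int × Int) :=
  if c p ≤ at_ ∧ at_ - c p < n then PySem.Set.add s (at_ - c p, r p) else s

def stepR (at_ n : Int) (c r : Int × Int → Int) (s : PySem.Set (Int × Int)) (p : Int × Int) : PySem.Set (Int × Int) :=
  if at_ < c p ∧ c p - at_ - 1 < n then PySem.Set.add s (c p - at_ - 1, r p) else s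

-- the mirror distance of a point
def distF (at_ : Int) (c : Int × Int → Int) (p : Int × Int) : Int :=
  if c p ≤ at_ then at_ - c p else c p - at_ - 1

lemma mem_foldl_stepL (at_ n : Int) (c r : Int × Int → Int) :
    ∀ (l : List (Int × Int)) (s : PySem.Set (Int × Int)) (x : Int × Int),
      x ∈ l.foldl (stepL at_ n c r) s ↔
        x ∈ s ∨ ∃ p ∈ l, (c p ≤ at_ ∧ at_ - c p < n) ∧ x = (at_ - c p, r p) := by
  intro l
  induction l with
  | nil => simp
  | cons q l ih =>
    intro s x
    simp only [List.foldl_cons, ih, List.mem_cons]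
    unfold stepL
    split_ifs with h
    · rw [PySem.Set.mem_add]
      constructor
      · rintro (⟨hs | hx⟩ | hp)
        · exact Or.inl hs
        · exact Or.inr ⟨q, Or.inl rfl, h, hx⟩
        · obtain ⟨p, hp, hc, hx⟩ := hp; exact Or.inr ⟨p, Or.inr hp, hc, hx⟩
      · rintro (hs | ⟨p, (rfl | hp), hc, hx⟩)
        · exact Or.inl (Or.inl hs)
        · exact Or.inl (Or.inr hx)
        · exact Or.inr ⟨p, hp, hc, hx⟩
    · constructor
      · rintro (hs | ⟨p, hp, hc, hx⟩)
        · exact Or.inl hs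
        · exact Or.inr ⟨p, Or.inr hp, hc, hx⟩
      · rintro (hs | ⟨p, (rfl | hp), hc, hx⟩)
        · exact Or.inl hs
        · exact absurd hc h
        · exact Or.inr ⟨p, hp, hc, hx⟩

lemma mem_foldl_stepR (at_ n : Int) (c r : Int × Int → Int) :
    ∀ (l : List (Int × Int)) (s : PySem.Set (Int × Int)) (x : Int × Int),
      x ∈ l.foldl (stepR at_ n c r) s ↔
        x ∈ s ∨ ∃ p ∈ l, (at_ < c p ∧ c p - at_ - 1 < n) ∧ x = (c p - at_ - 1, r p) := by
  intro l
  induction l with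
  | nil => simp
  | cons q l ih =>
    intro s x
    simp only [List.foldl_cons, ih, List.mem_cons]
    unfold stepR
    split_ifs with h
    · rw [PySem.Set.mem_add]
      constructor
      · rintro (⟨hs | hx⟩ | hp)
        · exact Or.inl hs
        · exact Or.inr ⟨q, Or.inl rfl, h, hx⟩
        · obtain ⟨p, hp, hc, hx⟩ := hp; exact Or.inr ⟨p, Or.inr hp, hc, hx⟩
      · rintro (hs | ⟨p, (rfl | hp), hc, hx⟩)
        · exact Or.inl (Or.inl hs)
        · exact Or.inl (Or.inr hx)
        · exact Or.inr ⟨p, hp, hc, hx⟩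
    · constructor
      · rintro (hs | ⟨p, hp, hc, hx⟩)
        · exact Or.inl hs
        · exact Or.inr ⟨p, Or.inr hp, hc, hx⟩
      · rintro (hs | ⟨p, (rfl | hp), hc, hx⟩)
        · exact Or.inl hs
        · exact absurd hc h
        · exact Or.inr ⟨p, hp, hc, hx⟩

-- Invariant for A's toggled set: it is (as a set) the symmetric difference of the two sides.
lemma tog_inv (at_ n : Int) (c r : Int × Int → Int)
    (hinj : ∀ p q : Int × Int, c p = c q → r p = r q → p = q) :
    ∀ l : List (Int × Int), l.Nodup →
      (l.foldl (stepT at_ n c r) []).Nodup ∧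
      ∀ x, x ∈ l.foldl (stepT at_ n c r) [] ↔
        ((x ∈ l.foldl (stepL at_ n c r) [] ∧ x ∉ l.foldl (stepR at_ n c r) []) ∨
         (x ∈ l.foldl (stepR at_ n c r) [] ∧ x ∉ l.foldl (stepL at_ n c r) [])) := by
  intro l
  induction l using List.reverseRecOn with
  | nil => simp
  | append_singleton l q ih =>
    intro hnd
    have hql : q ∉ l := by
      have := List.disjoint_of_nodup_append hnd
      intro h; exact this h (List.mem_singleton_self q)
    have hl : l.Nodup := (List.nodup_append.mp hnd).1
    obtain ⟨ihn, ihm⟩ := ih hl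
    simp only [List.foldl_append, List.foldl_cons, List.foldl_nil]
    set S := l.foldl (stepT at_ n c r) [] with hS
    set L := l.foldl (stepL at_ n c r) [] with hL
    set R := l.foldl (stepR at_ n c r) [] with hR
    by_cases hc : c q ≤ at_
    · by_cases hn' : at_ - c q < n
      · have hkey : (at_ - c q, r q) ∉ L := by
          rw [hL, mem_foldl_stepL]
          rintro (h | ⟨p, hp, hcond, heq⟩)
          · simp at h
          · have h1 : c p = c q := by
              have := (Prod.mk.injEq _ _ _ _).mp heq.symm; omega
            have h2 : r p = r q := by
              have := (Prod.mk.injEq _ _ _ _).mp heq.symm; exact this.2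
            exact hql (hinj p q h1 h2 ▸ hp)
        have hTstep : stepT at_ n c r S q =
            (if PySem.Set.contains S (at_ - c q, r q) then (PySem.Set.remove? S (at_ - c q, r q)).getD S
             else PySem.Set.add S (at_ - c q, r q)) := by
          unfold stepT
          simp only [if_pos hc, if_pos hn']
        have hLstep : stepL at_ n c r L q = PySem.Set.add L (at_ - c q, r q) := by
          unfold stepL; rw [if_pos ⟨hc, hn'⟩]
        have hRstep : stepR at_ n c r R q = R := by
          unfold stepR; rw [if_neg (by rintro ⟨h1, h2⟩; omega)]
        rw [hTstep, hLstep, hRstep]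
        by_cases hxS : (at_ - c q, r q) ∈ S
        · have hxR : (at_ - c q, r q) ∈ R := by
            rcases (ihm _).mp hxS with ⟨hL', _⟩ | ⟨hR', _⟩
            · exact absurd hL' hkey
            · exact hR'
          rw [if_pos ((PySem.Set.contains_iff _ _).mpr hxS),
              PySem.Set.remove?_of_mem hxS, Option.getD_some]
          refine ⟨PySem.Set.nodup_discard _ _ ihn, ?_⟩
          intro x
          rw [PySem.Set.mem_discard, ihm x, PySem.Set.mem_add]
          by_cases hx : x = (at_ - c q, r q)
          · subst hx; simp [hxR, hkey]
          · tauto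
        · have hxR : (at_ - c q, r q) ∉ R := by
            intro h
            exact hxS ((ihm _).mpr (Or.inr ⟨h, hkey⟩))
          rw [if_neg (by rw [PySem.Set.contains_iff]; exact hxS)]
          refine ⟨PySem.Set.nodup_add _ _ ihn, ?_⟩
          intro x
          rw [PySem.Set.mem_add, PySem.Set.mem_add, ihm x]
          by_cases hx : x = (at_ - c q, r q)
          · subst hx; simp [hxR, hkey]
          · tauto
      · have hTstep : stepT at_ n c r S q = S := by
          unfold stepT; simp only [if_pos hc, if_neg hn']
        have hLstep : stepL at_ n c r L q = L := by
          unfold stepL; rw [if_neg (by rintro ⟨h1, h2⟩; omega)]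
        have hRstep : stepR at_ n c r R q = R := by
          unfold stepR; rw [if_neg (by rintro ⟨h1, h2⟩; omega)]
        rw [hTstep, hLstep, hRstep]; exact ⟨ihn, ihm⟩
    · by_cases hn' : c q - at_ - 1 < n
      · have hkey : (c q - at_ - 1, r q) ∉ R := by
          rw [hR, mem_foldl_stepR]
          rintro (h | ⟨p, hp, hcond, heq⟩)
          · simp at h
          · have h1 : c p = c q := by
              have := (Prod.mk.injEq _ _ _ _).mp heq.symm; omega
            have h2 : r p = r q := by
              have := (Prod.mk.injEq _ _ _ _).mp heq.symm; exact this.2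
            exact hql (hinj p q h1 h2 ▸ hp)
        have hTstep : stepT at_ n c r S q =
            (if PySem.Set.contains S (c q - at_ - 1, r q) then (PySem.Set.remove? S (c q - at_ - 1, r q)).getD S
             else PySem.Set.add S (c q - at_ - 1, r q)) := by
          unfold stepT
          simp only [if_neg hc, if_pos hn']
        have hLstep : stepL at_ n c r L q = L := by
          unfold stepL; rw [if_neg (by rintro ⟨h1, h2⟩; omega)]
        have hRstep : stepR at_ n c r R q = PySem.Set.add R (c q - at_ - 1, r q) := by
          unfold stepR; rw [if_pos ⟨by omega, hn'⟩]
        rw [hTstep, hLstep, hRstep]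
        by_cases hxS : (c q - at_ - 1, r q) ∈ S
        · have hxL : (c q - at_ - 1, r q) ∈ L := by
            rcases (ihm _).mp hxS with ⟨hL', _⟩ | ⟨hR', _⟩
            · exact hL'
            · exact absurd hR' hkey
          rw [if_pos ((PySem.Set.contains_iff _ _).mpr hxS),
              PySem.Set.remove?_of_mem hxS, Option.getD_some]
          refine ⟨PySem.Set.nodup_discard _ _ ihn, ?_⟩
          intro x
          rw [PySem.Set.mem_discard, ihm x, PySem.Set.mem_add]
          by_cases hx : x = (c q - at_ - 1, r q)
          · subst hx; simp [hxL, hkey]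
          · tauto
        · have hxL : (c q - at_ - 1, r q) ∉ L := by
            intro h
            exact hxS ((ihm _).mpr (Or.inl ⟨h, hkey⟩))
          rw [if_neg (by rw [PySem.Set.contains_iff]; exact hxS)]
          refine ⟨PySem.Set.nodup_add _ _ ihn, ?_⟩
          intro x
          rw [PySem.Set.mem_add, PySem.Set.mem_add, ihm x]
          by_cases hx : x = (c q - at_ - 1, r q)
          · subst hx; simp [hxL, hkey]
          · tauto
      · have hTstep : stepT at_ n c r S q = S := by
          unfold stepT; simp only [if_neg hc, if_neg hn']
        have hLstep : stepL at_ n c r L q = L := by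
          unfold stepL; rw [if_neg (by rintro ⟨h1, h2⟩; omega)]
        have hRstep : stepR at_ n c r R q = R := by
          unfold stepR; rw [if_neg (by rintro ⟨h1, h2⟩; omega)]
        rw [hTstep, hLstep, hRstep]; exact ⟨ihn, ihm⟩

lemma memL_char (at_ n : Int) (c r : Int × Int → Int) (mk : Int → Int → Int × Int)
    (hc : ∀ a b, c (mk a b) = a) (hr : ∀ a b, r (mk a b) = b) (hmk : ∀ p, mk (c p) (r p) = p)
    (m : List (Int × Int)) (x : Int × Int) :
    x ∈ m.foldl (stepL at_ n c r) [] ↔ 0 ≤ x.1 ∧ x.1 < n ∧ mk (at_ - x.1) x.2 ∈ m := by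
  rw [mem_foldl_stepL]
  simp only [List.not_mem_nil, false_or]
  constructor
  · rintro ⟨p, hp, ⟨h1, h2⟩, rfl⟩
    refine ⟨by omega, by omega, ?_⟩
    have e : at_ - (at_ - c p) = c p := by ring
    simpa [e, hmk] using hp
  · rintro ⟨h0, hn', hm'⟩
    refine ⟨mk (at_ - x.1) x.2, hm', ⟨by rw [hc]; omega, by rw [hc]; omega⟩, ?_⟩
    rw [hc, hr]
    have e : at_ - (at_ - x.1) = x.1 := by ring
    rw [e]

lemma memR_char (at_ n : Int) (c r : Int × Int → Int) (mk : Int → Int → Int × Int)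
    (hc : ∀ a b, c (mk a b) = a) (hr : ∀ a b, r (mk a b) = b) (hmk : ∀ p, mk (c p) (r p) = p)
    (m : List (Int × Int)) (x : Int × Int) :
    x ∈ m.foldl (stepR at_ n c r) [] ↔ 0 ≤ x.1 ∧ x.1 < n ∧ mk (at_ + 1 + x.1) x.2 ∈ m := by
  rw [mem_foldl_stepR]
  simp only [List.not_mem_nil, false_or]
  constructor
  · rintro ⟨p, hp, ⟨h1, h2⟩, rfl⟩
    refine ⟨by omega, by omega, ?_⟩
    have e : at_ + 1 + (c p - at_ - 1) = c p := by ring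
    simpa [e, hmk] using hp
  · rintro ⟨h0, hn', hm'⟩
    refine ⟨mk (at_ + 1 + x.1) x.2, hm', ⟨by rw [hc]; omega, by rw [hc]; omega⟩, ?_⟩
    rw [hc, hr]
    have e : at_ + 1 + x.1 - at_ - 1 = x.1 := by ring
    rw [e]

-- x is in A's toggled set iff it is an in-band key present on exactly one side of the mirror.
lemma seen_char (at_ n : Int) (c r : Int × Int → Int) (mk : Int → Int → Int × Int)
    (hc : ∀ a b, c (mk a b) = a) (hr : ∀ a b, r (mk a b) = b) (hmk : ∀ p, mk (c p) (r p) = p)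
    (m : List (Int × Int)) (hnd : m.Nodup) (x : Int × Int) :
    x ∈ m.foldl (stepT at_ n c r) [] ↔
      0 ≤ x.1 ∧ x.1 < n ∧ ¬ (mk (at_ - x.1) x.2 ∈ m ↔ mk (at_ + 1 + x.1) x.2 ∈ m) := by
  have hinj : ∀ p q : Int × Int, c p = c q → r p = r q → p = q := by
    intro p q h1 h2
    have := hmk p
    rw [h1, h2, hmk q] at this
    exact this.symm
  rw [(tog_inv at_ n c r hinj m hnd).2 x,
      memL_char at_ n c r mk hc hr hmk m x, memR_char at_ n c r mk hc hr hmk m x]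
  constructor
  · rintro (⟨⟨h0, hn', hL⟩, hR⟩ | ⟨⟨h0, hn', hR⟩, hL⟩)
    · exact ⟨h0, hn', fun hiff => hR ⟨h0, hn', hiff.mp hL⟩⟩
    · exact ⟨h0, hn', fun hiff => hL ⟨h0, hn', hiff.mpr hR⟩⟩
  · rintro ⟨h0, hn', hx⟩
    by_cases hL : mk (at_ - x.1) x.2 ∈ m
    · exact Or.inl ⟨⟨h0, hn', hL⟩, fun h => hx ⟨fun _ => h.2.2, fun _ => hL⟩⟩
    · by_cases hR : mk (at_ + 1 + x.1) x.2 ∈ m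
      · exact Or.inr ⟨⟨h0, hn', hR⟩, fun h => hL h.2.2⟩
      · exact absurd ⟨fun h => absurd h hL, fun h => absurd h hR⟩ hx

-- y is a key of some in-band point whose mirror is missing iff y is an in-band key
-- present on exactly one side.
lemma map_key_char (at_ n : Int) (c r : Int × Int → Int) (mk : Int → Int → Int × Int)
    (hc : ∀ a b, c (mk a b) = a) (hr : ∀ a b, r (mk a b) = b) (hmk : ∀ p, mk (c p) (r p) = p)
    (m : List (Int × Int)) (y : Int × Int) :
    y ∈ (m.filter (fun p => decide (distF at_ c p < n ∧ mk (2 * at_ + 1 - c p) (r p) ∉ m))).map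
          (fun p => (distF at_ c p, r p)) ↔
      0 ≤ y.1 ∧ y.1 < n ∧ ¬ (mk (at_ - y.1) y.2 ∈ m ↔ mk (at_ + 1 + y.1) y.2 ∈ m) := by
  simp only [List.mem_map, List.mem_filter, decide_eq_true_eq]
  constructor
  · rintro ⟨p, ⟨hp, hd, hmir⟩, rfl⟩
    by_cases hcle : c p ≤ at_
    · have ed : distF at_ c p = at_ - c p := by unfold distF; rw [if_pos hcle]
      refine ⟨by rw [ed]; omega, by rw [ed]; exact ed ▸ hd, ?_⟩
      intro hiff
      have e1 : at_ - (distF at_ c p) = c p := by rw [ed]; ring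
      have e2 : at_ + 1 + (distF at_ c p) = 2 * at_ + 1 - c p := by rw [ed]; ring
      rw [e1, e2, hmk] at hiff
      exact hmir (hiff.mp hp)
    · have ed : distF at_ c p = c p - at_ - 1 := by unfold distF; rw [if_neg hcle]
      refine ⟨by rw [ed]; omega, ed ▸ hd, ?_⟩
      intro hiff
      have e1 : at_ - (distF at_ c p) = 2 * at_ + 1 - c p := by rw [ed]; ring
      have e2 : at_ + 1 + (distF at_ c p) = c p := by rw [ed]; ring
      rw [e1, e2, hmk] at hiff
      exact hmir (hiff.mpr hp)
  · rintro ⟨h0, hn', hx⟩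
    by_cases hL : mk (at_ - y.1) y.2 ∈ m
    · have hR : mk (at_ + 1 + y.1) y.2 ∉ m := fun h => hx ⟨fun _ => h, fun _ => hL⟩
      refine ⟨mk (at_ - y.1) y.2, ⟨hL, ?_, ?_⟩, ?_⟩
      · unfold distF; rw [hc, if_pos (by omega)]; omega
      · rw [hc, hr]
        have e : 2 * at_ + 1 - (at_ - y.1) = at_ + 1 + y.1 := by ring
        rw [e]; exact hR
      · unfold distF; rw [hc, hr, if_pos (by omega)]
        have e : at_ - (at_ - y.1) = y.1 := by ring
        rw [e]
    · have hR : mk (at_ + 1 + y.1) y.2 ∈ m := by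
        by_contra hR
        exact hx ⟨fun h => absurd h hL, fun h => absurd h hR⟩
      refine ⟨mk (at_ + 1 + y.1) y.2, ⟨hR, ?_, ?_⟩, ?_⟩
      · unfold distF; rw [hc, if_neg (by omega)]; omega
      · rw [hc, hr]
        have e : 2 * at_ + 1 - (at_ + 1 + y.1) = at_ - y.1 := by ring
        rw [e]; exact hL
      · unfold distF; rw [hc, hr, if_neg (by omega)]
        have e : at_ + 1 + y.1 - at_ - 1 = y.1 := by ring
        rw [e]

-- the key map is injective on the in-band points whose mirror is missing
lemma key_inj (at_ n : Int) (c r : Int × Int → Int) (mk : Int → Int → Int × Int)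
    (hmk : ∀ p, mk (c p) (r p) = p)
    (m : List (Int × Int)) :
    ∀ p ∈ m.filter (fun p => decide (distF at_ c p < n ∧ mk (2 * at_ + 1 - c p) (r p) ∉ m)),
    ∀ q ∈ m.filter (fun p => decide (distF at_ c p < n ∧ mk (2 * at_ + 1 - c p) (r p) ∉ m)),
      (distF at_ c p, r p) = (distF at_ c q, r q) → p = q := by
  intro p hp q hq hkey
  simp only [List.mem_filter, decide_eq_true_eq] at hp hq
  have hd : distF at_ c p = distF at_ c q := (Prod.mk.injEq _ _ _ _).mp hkey |>.1
  have hrr : r p = r q := (Prod.mk.injEq _ _ _ _).mp hkey |>.2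
  unfold distF at hd
  by_cases h1 : c p ≤ at_ <;> by_cases h2 : c q ≤ at_
  · rw [if_pos h1, if_pos h2] at hd
    have : c p = c q := by omega
    rw [← hmk p, this, hrr, hmk q]
  · rw [if_pos h1, if_neg h2] at hd
    exfalso
    apply hp.2.2
    have e : 2 * at_ + 1 - c p = c q := by omega
    rw [e, hrr, hmk q]
    exact hq.1
  · rw [if_neg h1, if_pos h2] at hd
    exfalso
    apply hq.2.2
    have e : 2 * at_ + 1 - c q = c p := by omega
    rw [e, ← hrr, hmk p]
    exact hp.1
  · rw [if_neg h1, if_neg h2] at hd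
    have : c p = c q := by omega
    rw [← hmk p, this, hrr, hmk q]

-- the size of A's toggled set equals B's count of in-band points with missing mirror
lemma lenT_eq_count (at_ n : Int) (c r : Int × Int → Int) (mk : Int → Int → Int × Int)
    (hc : ∀ a b, c (mk a b) = a) (hr : ∀ a b, r (mk a b) = b) (hmk : ∀ p, mk (c p) (r p) = p)
    (m : List (Int × Int)) (hnd : m.Nodup) :
    PySem.Set.len (m.foldl (stepT at_ n c r) []) =
      ((m.filter (fun p => decide (distF at_ c p < n ∧ mk (2 * at_ + 1 - c p) (r p) ∉ m))).length : Int) := by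
  have hnodupS := (tog_inv at_ n c r (by
    intro p q h1 h2
    have := hmk p
    rw [h1, h2, hmk q] at this
    exact this.symm) m hnd).1
  have hnodupM : ((m.filter (fun p => decide (distF at_ c p < n ∧ mk (2 * at_ + 1 - c p) (r p) ∉ m))).map
      (fun p => (distF at_ c p, r p))).Nodup :=
    (hnd.filter _).map_on (key_inj at_ n c r mk hmk m)
  have hperm : (m.foldl (stepT at_ n c r) []).Perm
      ((m.filter (fun p => decide (distF at_ c p < n ∧ mk (2 * at_ + 1 - c p) (r p) ∉ m))).map
        (fun p => (distF at_ c p, r p))) := by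
    rw [List.perm_ext_iff_of_nodup hnodupS hnodupM]
    intro x
    rw [seen_char at_ n c r mk hc hr hmk m hnd x, map_key_char at_ n c r mk hc hr hmk m x]
  unfold PySem.Set.len
  rw [hperm.length_eq, List.length_map]

-- B's counting fold counts the filtered list
lemma foldl_cnt (d : Int × Int → Int) (n : Int) (g : Int × Int → Int × Int) (m : List (Int × Int)) :
    ∀ (l : List (Int × Int)) (k : Int),
      l.foldl (fun k p => if d p < n then (if g p ∈ m then k else k + 1) else k) k
        = k + ((l.filter (fun p => decide (d p < n ∧ g p ∉ m))).length : Int) := by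
  intro l
  induction l with
  | nil => intro k; simp
  | cons q l ih =>
    intro k
    rw [List.foldl_cons, List.filter_cons]
    by_cases h1 : d q < n
    · by_cases h2 : g q ∈ m
      · rw [if_pos h1, if_pos h2, ih]
        simp [h1, h2]
      · rw [if_pos h1, if_neg h2, ih]
        simp only [h1, h2, not_false_eq_true, and_self, decide_true, if_pos]
        simp only [List.length_cons]
        push_cast
        ring
    · rw [if_neg h1, ih]
      simp [h1]

-- generic: a fold whose step fixes the accumulator on every list element
lemma foldl_fix {α β : Type} (f : β → α → β) :
    ∀ (l : List α) (b : β), (∀ a ∈ l, ∀ x, f x a = x) → l.foldl f b = b := by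
  intro l
  induction l with
  | nil => intro b _; rfl
  | cons q l ih =>
    intro b h
    rw [List.foldl_cons, h q (List.mem_cons_self), ih]
    intro a ha x
    exact h a (List.mem_cons_of_mem q ha) x

-- Bridging the ports' folds to the abstract step functions (axis i = 0 and i = 1).
lemma fnA_zero (at_ n : Int) :
    (fun (s : PySem.Set (Int × Int)) (p : Int × Int) =>
      match tupGet? p 0 with
      | none => s
      | some pi =>
        let a := if pi ≤ at_ then at_ - pi else pi - at_ - 1
        if a < n then
          match tupGet? p (1 - 0) with
          | none => s
          | some po =>
            if PySem.Set.contains s (a, po) then (PySem.Set.remove? s (a, po)).getD s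
            else PySem.Set.add s (a, po)
        else s) = stepT at_ n Prod.fst Prod.snd := by
  funext s p
  simp [tupGet?, stepT]

lemma fnA_one (at_ n : Int) :
    (fun (s : PySem.Set (Int × Int)) (p : Int × Int) =>
      match tupGet? p 1 with
      | none => s
      | some pi =>
        let a := if pi ≤ at_ then at_ - pi else pi - at_ - 1
        if a < n then
          match tupGet? p (1 - 1) with
          | none => s
          | some po =>
            if PySem.Set.contains s (a, po) then (PySem.Set.remove? s (a, po)).getD s
            else PySem.Set.add s (a, po)
        else s) = stepT at_ n Prod.snd Prod.fst := by
  funext s p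
  simp [tupGet?, stepT]

lemma fnB_zero (at_ n : Int) (m : List (Int × Int)) :
    (fun (k : Int) (p : Int × Int) =>
      match tupGet? p 0 with
      | none => k
      | some pi =>
        let d := if pi ≤ at_ then at_ - pi else pi - at_ - 1
        if d < n then
          if tupSet p 0 (2 * at_ + 1 - pi) ∈ m then k else k + 1
        else k)
    = fun (k : Int) (p : Int × Int) =>
        if distF at_ Prod.fst p < n then
          (if (2 * at_ + 1 - p.1, p.2) ∈ m then k else k + 1) else k := by
  funext k p
  simp [tupGet?, tupSet, distF]

lemma fnB_one (at_ n : Int) (m : List (Int × Int)) :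
    (fun (k : Int) (p : Int × Int) =>
      match tupGet? p 1 with
      | none => k
      | some pi =>
        let d := if pi ≤ at_ then at_ - pi else pi - at_ - 1
        if d < n then
          if tupSet p 1 (2 * at_ + 1 - pi) ∈ m then k else k + 1
        else k)
    = fun (k : Int) (p : Int × Int) =>
        if distF at_ Prod.snd p < n then
          (if (p.1, 2 * at_ + 1 - p.2) ∈ m then k else k + 1) else k := by
  funext k p
  simp [tupGet?, tupSet, distF]

-- Both ports agree whenever no list element ever changes the accumulator
-- (covers i = -1/-2 under Pre_, any valid i with m = [], and indices with no tuple access).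
lemma inactive_eq (at_ i : Int) (m : List (Int × Int)) (dim : List Int) (n_smudge : Int)
    (H : ∀ p ∈ m, ∀ pi, tupGet? p i = some pi →
      ∀ di, PySem.List.pyGet? dim i = some di →
        ¬ ((if pi ≤ at_ then at_ - pi else pi - at_ - 1) < min (at_ + 1) (di - at_ - 1))) :
    can_reflect at_ i m dim n_smudge = can_reflect_alt at_ i m dim n_smudge := by
  unfold can_reflect can_reflect_alt
  cases hd : PySem.List.pyGet? dim i with
  | none => rfl
  | some di =>
    simp only
    rw [foldl_fix _ m _ (by
          intro p hp x
          cases hg : tupGet? p i with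
          | none => rfl
          | some pi =>
            simp only
            rw [if_neg (H p hp pi hg di hd)]),
        foldl_fix _ m _ (by
          intro p hp x
          cases hg : tupGet? p i with
          | none => rfl
          | some pi =>
            simp only
            rw [if_neg (H p hp pi hg di hd)])]
    norm_num [PySem.Set.len, PySem.Set.empty]

-- ===== VERDICT (by name: the statement is the Claim_ definition above) =====
theorem can_reflect_spec : Claim_equal_can_reflect := by
  unfold Claim_equal_can_reflect
  intro at_ i m dim n_smudge _ hpre
  unfold Spec_can_reflect
  by_cases hi0 : i = 0
  · subst hi0
    have hnd : m.Nodup := by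
      rcases hpre with ⟨_, _, hnd⟩ | ⟨h | h, -, -⟩ | ⟨rfl, -, -⟩
      · exact hnd
      · exact absurd h (by norm_num)
      · exact absurd h (by norm_num)
      · exact List.nodup_nil
    unfold can_reflect can_reflect_alt
    cases hd : PySem.List.pyGet? dim 0 with
    | none => rfl
    | some di =>
      simp only
      rw [fnA_zero, fnB_zero, foldl_cnt,
          show (PySem.Set.empty : PySem.Set (Int × Int)) = [] from rfl,
          lenT_eq_count at_ (min (at_ + 1) (di - at_ - 1)) Prod.fst Prod.snd
            (fun a b => (a, b)) (fun a b => rfl) (fun a b => rfl) (fun p => rfl) m hnd]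
      norm_num
  · by_cases hi1 : i = 1
    · subst hi1
      have hnd : m.Nodup := by
        rcases hpre with ⟨_, _, hnd⟩ | ⟨h | h, -, -⟩ | ⟨rfl, -, -⟩
        · exact hnd
        · exact absurd h (by norm_num)
        · exact absurd h (by norm_num)
        · exact List.nodup_nil
      unfold can_reflect can_reflect_alt
      cases hd : PySem.List.pyGet? dim 1 with
      | none => rfl
      | some di =>
        simp only
        rw [fnA_one, fnB_one, foldl_cnt,
            show (PySem.Set.empty : PySem.Set (Int × Int)) = [] from rfl,
            lenT_eq_count at_ (min (at_ + 1) (di - at_ - 1)) Prod.snd Prod.fst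
              (fun a b => (b, a)) (fun a b => rfl) (fun a b => rfl) (fun p => rfl) m hnd]
        norm_num
    · apply inactive_eq
      intro p hp pi hg di hd
      rcases hpre with ⟨h | h, -, -⟩ | ⟨hi, hlen, hno⟩ | ⟨rfl, -, -⟩
      · exact absurd h hi0
      · exact absurd h hi1
      · have hdi : PySem.List.pyGetD dim i 0 = di := by
          unfold PySem.List.pyGetD
          rw [hd, Option.getD_some]
        have hpi : pi = (if i = -1 then p.2 else p.1) := by
          rcases hi with rfl | rfl
          · simp [tupGet?] at hg; omega
          · simp [tupGet?] at hg; omega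
        have := hno p hp
        rw [hdi] at this
        rw [hpi]
        exact this
      · exact absurd hp (List.not_mem_nil)
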